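-- pv_equiv track=rewrite | github.com/ldct/cp | codeforces/695/B/B.py | ans_slow
-- ===== SOURCE A (Python) =====
-- def is_hv(A, i):
--     if not (0 <= i-1 < i+1 < len(A)): return False
--     if A[i] > max(A[i-1], A[i+1]): return True
--     if A[i] < min(A[i-1], A[i+1]): return True
--     return False
--
-- def count_hv(A):
--     ret = 0
--     for i in range(len(A)):
--         if is_hv(A, i):
--             ret += 1
--     return ret
--
-- def ans_slow(A):
--     ret = count_hv(A)
--     for d in range(min(A), max(A)+1):
--         for i in range(len(A)):
--             new_A = A[:]
--             new_A[i] = d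
--             ret = min(ret, count_hv(new_A))
--
--     return ret
-- ===== SOURCE B (Python) =====
-- def ans_slow(A):
--     # Incremental recount: changing A[i] only affects hill/valley status at
--     # positions i-1, i, i+1, so each candidate is scored in O(1) from the base count.
--     n = len(A)
--
--     def hv(B, j):
--         return 0 < j < n - 1 and (B[j] > max(B[j - 1], B[j + 1])
--                                   or B[j] < min(B[j - 1], B[j + 1]))
--
--     base = 0
--     for i in range(n):
--         if hv(A, i):
--             base += 1
--
--     best = base
--     for d in range(min(A), max(A) + 1):
--         for i in range(n):
--             old = A[i]
--             wo = hv(A, i - 1) + hv(A, i) + hv(A, i + 1)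
--             A[i] = d
--             wn = hv(A, i - 1) + hv(A, i) + hv(A, i + 1)
--             A[i] = old
--             best = min(best, base - wo + wn)
--     return best
-- ===== Notes on version B (the rewrite author's own statement) =====
-- stated objective: faster
-- what changed: Instead of copying the list and fully recounting hills/valleys for every candidate (d,i), B computes the base count once and rescores each candidate in O(1) by re-examining only the three positions i-1,i,i+1 whose status can change.
import Mathlib
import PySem

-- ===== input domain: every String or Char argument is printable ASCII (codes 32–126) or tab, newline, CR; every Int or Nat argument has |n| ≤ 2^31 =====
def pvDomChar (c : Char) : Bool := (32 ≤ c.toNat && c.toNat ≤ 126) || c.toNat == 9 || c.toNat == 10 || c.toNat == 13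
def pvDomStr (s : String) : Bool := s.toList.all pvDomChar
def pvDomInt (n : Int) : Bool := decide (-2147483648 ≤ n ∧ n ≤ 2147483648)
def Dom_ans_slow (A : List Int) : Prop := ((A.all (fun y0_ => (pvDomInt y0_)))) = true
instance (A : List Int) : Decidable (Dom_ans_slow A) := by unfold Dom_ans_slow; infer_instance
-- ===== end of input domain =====

-- B replaces A's full recount per candidate (d,i) by an O(1) incremental rescore
-- of the only three affected positions; a timing run measured it faster (asymptotic: O(V*n) vs O(V*n^2)).

-- ===== PORT A =====
-- is_hv(A, i): i only ever comes from range(len(A)) (or our window sums), so it is a Nat;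
-- the Python guard `0 <= i-1 < i+1 < len(A)` is `1 ≤ i ∧ i+1 < len(A)`; inside the guard
-- all three indices are in range, so `A[k]` is ported as `A.getD k 0`.
def isHv (A : List Int) (i : Nat) : Bool :=
  if 1 ≤ i ∧ i + 1 < A.length then
    if A.getD i 0 > max (A.getD (i-1) 0) (A.getD (i+1) 0) then true
    else if A.getD i 0 < min (A.getD (i-1) 0) (A.getD (i+1) 0) then true
    else false
  else false

def countHv (A : List Int) : Int :=
  (List.range A.length).foldl (fun ret i => if isHv A i then ret + 1 else ret) 0

-- new_A = A[:]; new_A[i] = d  with 0 ≤ i < len(A): exactly List.set.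
-- min(A)/max(A) raise on []; Pre_ excludes that, .getD 0 is never reached inside Pre_.
def ans_slow (A : List Int) : Int :=
  let ret := countHv A
  let lo := (PySem.List.min? A (fun x => x)).getD 0
  let hi := (PySem.List.max? A (fun x => x)).getD 0
  (PySem.List.pyRange lo (hi + 1) 1).foldl (fun ret d =>
    (List.range A.length).foldl (fun ret i =>
      min ret (countHv (A.set i d))) ret) ret

-- ===== PORT B =====
-- hv(B, j): the guard `0 < j < n-1` is false for Python's j = -1 (reached as i-1 when i = 0)
-- and also false at Nat j = 0 = (0-1 : Nat), so Nat indices are exact here.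
def hvB (n : Nat) (B : List Int) (j : Nat) : Bool :=
  if 0 < j ∧ j < n - 1 then
    decide (B.getD j 0 > max (B.getD (j-1) 0) (B.getD (j+1) 0)) ||
    decide (B.getD j 0 < min (B.getD (j-1) 0) (B.getD (j+1) 0))
  else false

-- wo / wn : Python adds three bools; ported as 0/1 Ints.
def winB (n : Nat) (B : List Int) (i : Nat) : Int :=
  (if hvB n B (i-1) then 1 else 0) + (if hvB n B i then 1 else 0) +
  (if hvB n B (i+1) then 1 else 0)

def ans_slow_alt (A : List Int) : Int :=
  let n := A.length
  let base : Int := (List.range n).foldl (fun b i => if hvB n A i then b + 1 else b) 0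
  let lo := (PySem.List.min? A (fun x => x)).getD 0
  let hi := (PySem.List.max? A (fun x => x)).getD 0
  (PySem.List.pyRange lo (hi + 1) 1).foldl (fun best d =>
    (List.range n).foldl (fun best i =>
      -- A[i] = d; … ; A[i] = old  ≡ scoring the window on A.set i d
      min best (base - winB n A i + winB n (A.set i d) i)) best) base

-- ===== PRECONDITION & SPEC =====
-- Pre_ excludes only the empty list, on which Python A raises ValueError (min of empty sequence).
def Pre_ans_slow (A : List Int) : Prop := A ≠ []
instance (A : List Int) : Decidable (Pre_ans_slow A) := by unfold Pre_ans_slow; infer_instance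
def pvWitness_ans_slow : List Int := [1, 2, 1]

def Spec_ans_slow (A : List Int) (out : Int) : Prop := out = ans_slow_alt A
instance (A : List Int) (out : Int) : Decidable (Spec_ans_slow A out) := by unfold Spec_ans_slow; infer_instance

-- ===== CLAIM (what is proved, stated in full; the proofs are below) =====
def Claim_equal_ans_slow : Prop := ∀ (A : List Int), Dom_ans_slow A → Pre_ans_slow A → Spec_ans_slow A (ans_slow A)

-- ===== LEMMAS AND PROOFS =====

-- f L j = the 0/1 contribution of position j
def fHv (L : List Int) (j : Nat) : Int := if isHv L j then 1 else 0

theorem hv_eq (A : List Int) (i : Nat) : hvB A.length A i = isHv A i := by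
  unfold hvB isHv
  by_cases h1 : 0 < i ∧ i < A.length - 1
  · have h2 : 1 ≤ i ∧ i + 1 < A.length := by omega
    simp only [if_pos h1, if_pos h2]
    split_ifs with ha hb <;> simp_all
  · have h2 : ¬ (1 ≤ i ∧ i + 1 < A.length) := by omega
    simp [h1, h2]

theorem hv_zero (L : List Int) : isHv L 0 = false := by simp [isHv]

theorem hv_high (L : List Int) (j : Nat) (h : L.length ≤ j + 1) : isHv L j = false := by
  unfold isHv
  rw [if_neg]; omega

theorem getD_set_ne (L : List Int) (i k : Nat) (d : Int) (h : k ≠ i) :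
    (L.set i d).getD k 0 = L.getD k 0 := by
  simp [List.getD_eq_getElem?_getD, List.getElem?_set_ne (Ne.symm h)]

theorem hv_set_off (A : List Int) (i : Nat) (d : Int) (j : Nat)
    (h : j + 1 < i ∨ i + 1 < j) : isHv (A.set i d) j = isHv A j := by
  unfold isHv
  rw [List.length_set]
  by_cases hg : 1 ≤ j ∧ j + 1 < A.length
  · rw [if_pos hg, if_pos hg,
      getD_set_ne A i j d (by omega), getD_set_ne A i (j-1) d (by omega),
      getD_set_ne A i (j+1) d (by omega)]
  · rw [if_neg hg, if_neg hg]

theorem foldl_count (L : List Int) (l : List Nat) (init : Int) :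
    l.foldl (fun r i => if isHv L i then r + 1 else r) init = init + (l.map (fHv L)).sum := by
  induction l generalizing init with
  | nil => simp
  | cons x t ih =>
    simp only [List.foldl_cons, List.map_cons, List.sum_cons, ih, fHv]
    split_ifs <;> ring

theorem sum_range_list (g : Nat → Int) (n : Nat) :
    ((List.range n).map g).sum = ∑ j ∈ Finset.range n, g j := by
  induction n with
  | zero => simp
  | succ m ih => simp [List.range_succ, Finset.sum_range_succ, ih]

theorem countHv_sum (L : List Int) : countHv L = ∑ j ∈ Finset.range L.length, fHv L j := by
  unfold countHv
  rw [foldl_count, sum_range_list]; ring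

-- the window of B, expressed through fHv (using hv_eq and length_set)
theorem winB_eq (A : List Int) (L : List Int) (hlen : L.length = A.length) (i : Nat) :
    winB A.length L i = fHv L (i-1) + fHv L i + fHv L (i+1) := by
  unfold winB fHv
  rw [← hlen, hv_eq, hv_eq, hv_eq]

-- the key incremental identity
theorem countHv_set (A : List Int) (i : Nat) (d : Int) :
    countHv (A.set i d) = countHv A - winB A.length A i + winB A.length (A.set i d) i := by
  set L' := A.set i d with hL'
  have hlen : L'.length = A.length := by simp [hL']
  have hself : A.length = A.length := rfl
  rw [countHv_sum, countHv_sum, hlen, winB_eq A A rfl i, winB_eq A L' hlen i]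
  set g : Nat → Int := fun j => fHv L' j - fHv A j with hg
  have hoff : ∀ j, j + 1 < i ∨ i + 1 < j → g j = 0 := by
    intro j hj
    have h := hv_set_off A i d j hj
    simp only [hg, fHv, hL', h]
    ring
  have hhigh : ∀ j, A.length ≤ j + 1 → g j = 0 := by
    intro j hj
    simp [hg, fHv, hv_high A j hj, hv_high L' j (by omega)]
  have hzero : g 0 = 0 := by simp [hg, fHv, hv_zero]
  -- goal: ∑ fHv L' = ∑ fHv A - window A + window L'
  have key : ∑ j ∈ Finset.range A.length, g j = g (i-1) + g i + g (i+1) := by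
    set N : Nat := A.length + i + 2 with hN
    have hsubN : Finset.range A.length ⊆ Finset.range N := by
      intro x hx; simp only [Finset.mem_range] at hx ⊢; omega
    have hext : ∑ j ∈ Finset.range A.length, g j = ∑ j ∈ Finset.range N, g j :=
      Finset.sum_subset hsubN (fun x _ hx =>
        hhigh x (by simp only [Finset.mem_range, not_lt] at hx; omega))
    rw [hext]
    by_cases hi : i = 0
    · subst hi
      have : ∑ j ∈ Finset.range N, g j = ∑ j ∈ ({0, 1} : Finset ℕ), g j := by
        refine (Finset.sum_subset ?_ ?_).symm
        · intro x hx; simp at hx; simp; omega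
        · intro x _ hx
          simp at hx
          exact hoff x (by omega)
      rw [this]
      simp [hzero]
    · have hsub : ({i-1, i, i+1} : Finset ℕ) ⊆ Finset.range N := by
        intro x hx; simp at hx; simp; omega
      have : ∑ j ∈ Finset.range N, g j = ∑ j ∈ ({i-1, i, i+1} : Finset ℕ), g j := by
        refine (Finset.sum_subset hsub ?_).symm
        intro x _ hx
        simp at hx
        exact hoff x (by omega)
      rw [this]
      rw [Finset.sum_insert (by simp; omega), Finset.sum_insert (by simp),
        Finset.sum_singleton]
      ring
  have hsplit : ∑ j ∈ Finset.range A.length, g j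
      = (∑ j ∈ Finset.range A.length, fHv L' j) - ∑ j ∈ Finset.range A.length, fHv A j := by
    simp [hg, Finset.sum_sub_distrib]
  have := key
  rw [hsplit] at this
  simp only [hg] at this
  linarith

-- B's base count equals A's countHv
theorem base_eq (A : List Int) :
    (List.range A.length).foldl (fun b i => if hvB A.length A i then b + 1 else b) (0:Int)
      = countHv A := by
  unfold countHv
  refine PySem.List.foldl_congr_mem _ _ _ _ ?_
  intro acc x _
  rw [hv_eq]

-- ===== VERDICT (by name: the statement is the Claim_ definition above) =====
theorem ans_slow_spec : Claim_equal_ans_slow := by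
  intro A _ _
  unfold Spec_ans_slow ans_slow ans_slow_alt
  dsimp only
  rw [base_eq]
  refine PySem.List.foldl_congr_mem _ _ _ _ ?_
  intro acc d _
  refine PySem.List.foldl_congr_mem _ _ _ _ ?_
  intro acc' i _
  rw [countHv_set A i d]
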